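-- pv_equiv track=rewrite | github.com/MarizonCE/my_python_practice | intelligent_algorithm/2动画.py | generate_slow_frames
-- ===== SOURCE A (Python) =====
-- def generate_slow_frames(total_gens, slow_gens=10, slow_factor=3):
--     frames = []
--     for i in range(total_gens):
--         if i < slow_gens:
--             frames.extend([i] * slow_factor)
--         else:
--             frames.append(i)
--     return frames
-- ===== SOURCE B (Python) =====
-- def generate_slow_frames(total_gens, slow_gens=10, slow_factor=3):
--     # closed-form position->value map: the repeated region has b*r output slots
--     # and slot k holds frame k // r; the tail is the plain range from b on.
--     b = max(0, min(slow_gens, total_gens))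
--     r = max(0, slow_factor)
--     return [k // r for k in range(b * r)] + list(range(b, total_gens))
-- ===== Notes on version B (the rewrite author's own statement) =====
-- stated objective: alternative
-- what changed: Instead of looping over frame indices and repeating/appending each one, B computes the repeated region's size b*r up front and maps each output POSITION k to its frame index by the closed form k // slow_factor, then concatenates the plain tail list(range(b, total_gens)).
import Mathlib
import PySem

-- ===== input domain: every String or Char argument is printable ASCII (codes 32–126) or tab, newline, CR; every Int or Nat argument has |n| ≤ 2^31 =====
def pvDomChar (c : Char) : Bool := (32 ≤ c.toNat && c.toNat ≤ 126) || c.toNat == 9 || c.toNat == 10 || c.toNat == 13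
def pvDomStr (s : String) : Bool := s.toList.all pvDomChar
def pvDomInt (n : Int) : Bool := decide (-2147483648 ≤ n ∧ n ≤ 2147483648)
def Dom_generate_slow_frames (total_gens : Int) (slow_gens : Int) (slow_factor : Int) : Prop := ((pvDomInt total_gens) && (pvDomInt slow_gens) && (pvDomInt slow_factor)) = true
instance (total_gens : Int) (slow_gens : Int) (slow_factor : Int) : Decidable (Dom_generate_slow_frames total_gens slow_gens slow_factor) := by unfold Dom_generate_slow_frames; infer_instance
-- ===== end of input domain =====

-- B replaces A's build-by-repetition loop with a closed-form map from each output POSITION in the repeated region to its frame index (k // slow_factor), plus the plain tail range; alternative algorithm, same cost.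

-- ===== PORT A =====
-- loop over range(total_gens); '[i] * slow_factor' is List.replicate slow_factor.toNat i (Python clamps a negative repeat count to 0, exactly as toNat does)
def generate_slow_frames (total_gens : Int) (slow_gens : Int) (slow_factor : Int) : List Int :=
  (PySem.List.pyRange 0 total_gens 1).foldl
    (fun frames i => if i < slow_gens then frames ++ List.replicate slow_factor.toNat i else frames ++ [i]) []

-- ===== PORT B =====
-- comprehension over the b*r output positions of the repeated region, concatenated with list(range(b, total_gens))
def generate_slow_frames_alt (total_gens : Int) (slow_gens : Int) (slow_factor : Int) : List Int :=
  let b := max 0 (min slow_gens total_gens)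
  let r := max 0 slow_factor
  (PySem.List.pyRange 0 (b * r) 1).map (fun k => PySem.Int.floordiv k r)
    ++ PySem.List.pyRange b total_gens 1

-- ===== PRECONDITION & SPEC =====
def Spec_generate_slow_frames (total_gens : Int) (slow_gens : Int) (slow_factor : Int) (out : List Int) : Prop := out = generate_slow_frames_alt total_gens slow_gens slow_factor
instance (total_gens : Int) (slow_gens : Int) (slow_factor : Int) (out : List Int) : Decidable (Spec_generate_slow_frames total_gens slow_gens slow_factor out) := by unfold Spec_generate_slow_frames; infer_instance

-- ===== CLAIM =====
def Claim_equal_generate_slow_frames : Prop := ∀ (total_gens : Int) (slow_gens : Int) (slow_factor : Int), Dom_generate_slow_frames total_gens slow_gens slow_factor → Spec_generate_slow_frames total_gens slow_gens slow_factor (generate_slow_frames total_gens slow_gens slow_factor)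

-- ===== LEMMAS AND PROOFS =====

-- A's foldl, with the branch rewritten as a single extend, is a flatMap over the whole range
theorem gsf_foldl_flatMap (l : List Int) (s f : Int) (acc : List Int) :
    l.foldl (fun frames i => if i < s then frames ++ List.replicate f.toNat i else frames ++ [i]) acc
      = acc ++ l.flatMap (fun i => if i < s then List.replicate f.toNat i else [i]) := by
  induction l generalizing acc with
  | nil => simp
  | cons x xs ih =>
      simp only [List.foldl_cons, List.flatMap_cons, ih]
      split <;> simp

theorem gsf_a_flatMap (t s f : Int) :
    generate_slow_frames t s f =
      (PySem.List.pyRange 0 t 1).flatMap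
        (fun i => if i < s then List.replicate f.toNat i else [i]) := by
  unfold generate_slow_frames
  rw [gsf_foldl_flatMap]
  simp

-- the tail of the flatMap, where no index is < s, is the range itself
theorem gsf_tail_flatMap (l : List Int) (s : Int) (f : Int) (h : ∀ i ∈ l, ¬ i < s) :
    l.flatMap (fun i => if i < s then List.replicate f.toNat i else [i]) = l := by
  induction l with
  | nil => rfl
  | cons x xs ih =>
      simp only [List.flatMap_cons]
      rw [if_neg (h x (by simp)), ih (fun i hi => h i (List.mem_cons_of_mem _ hi))]
      rfl

-- one block of B's prefix: positions [n*r, n*r + r) all floor-divide to n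
theorem gsf_block (n : Int) (r : Int) (hr : 0 < r) :
    (PySem.List.pyRange (n * r) (n * r + r) 1).map (fun k => PySem.Int.floordiv k r)
      = List.replicate r.toNat n := by
  rw [PySem.List.pyRange_one]
  have hlen : (n * r + r - n * r).toNat = r.toNat := by omega
  rw [hlen, List.map_map]
  rw [show (List.replicate r.toNat n) = (List.range r.toNat).map (fun _ => n) by
        rw [List.map_const']; simp]
  apply List.map_congr_left
  intro j hj
  have hjr : (j : Int) < r := by
    have := List.mem_range.1 hj; omega
  simp only [Function.comp_apply]
  rw [PySem.Int.floordiv_eq_iff_of_pos hr]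
  constructor <;> nlinarith [Int.natCast_nonneg j]

-- B's prefix over positions [0, n*r) is A's flatMap of replicated blocks over [0, n)
theorem gsf_prefix (n : Nat) (r : Int) (hr : 0 < r) :
    (PySem.List.pyRange 0 ((n : Int) * r) 1).map (fun k => PySem.Int.floordiv k r)
      = (PySem.List.pyRange 0 (n : Int) 1).flatMap (fun i => List.replicate r.toNat i) := by
  induction n with
  | zero => simp [PySem.List.pyRange_one_eq_nil]
  | succ m ih =>
      have h1 : ((m + 1 : Nat) : Int) * r = (m : Int) * r + r := by push_cast; ring
      have h2 : PySem.List.pyRange 0 ((m : Int) * r + r) 1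
          = PySem.List.pyRange 0 ((m : Int) * r) 1 ++ PySem.List.pyRange ((m : Int) * r) ((m : Int) * r + r) 1 := by
        apply PySem.List.pyRange_one_append <;> nlinarith [Int.natCast_nonneg m]
      have h3 : PySem.List.pyRange 0 ((m + 1 : Nat) : Int) 1
          = PySem.List.pyRange 0 (m : Int) 1 ++ [(m : Int)] := by
        have := PySem.List.pyRange_one_succ_right (a := 0) (b := (m : Int)) (Int.natCast_nonneg m)
        push_cast
        simpa using this
      rw [h1, h2, List.map_append, ih, h3, List.flatMap_append, gsf_block _ _ hr]
      simp

theorem generate_slow_frames_eq (t s f : Int) :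
    generate_slow_frames t s f = generate_slow_frames_alt t s f := by
  rw [gsf_a_flatMap]
  unfold generate_slow_frames_alt
  set b := max 0 (min s t) with hbdef
  set r := max 0 f with hrdef
  have hb0 : 0 ≤ b := le_max_left _ _
  have hr0 : 0 ≤ r := le_max_left _ _
  have hrf : r.toNat = f.toNat := by omega
  by_cases ht : t ≤ 0
  · have h1 : PySem.List.pyRange 0 t 1 = [] := PySem.List.pyRange_one_eq_nil ht
    have hb : b = 0 := by omega
    simp [h1, hb, PySem.List.pyRange_one_eq_nil (le_refl (0 : Int))]
  · rw [not_le] at ht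
    have hbt : b ≤ t := by omega
    rw [PySem.List.pyRange_one_append 0 b t hb0 hbt, List.flatMap_append]
    congr 1
    · -- repeated region: A replicates each i, B floor-divides each position
      have hA : (PySem.List.pyRange 0 b 1).flatMap
            (fun i => if i < s then List.replicate f.toNat i else [i])
          = (PySem.List.pyRange 0 b 1).flatMap (fun i => List.replicate f.toNat i) := by
        apply List.flatMap_congr
        intro i hi
        have := (PySem.List.mem_pyRange_one).1 hi
        rw [if_pos (by omega)]
      rw [hA]
      rcases lt_or_ge 0 r with hr | hr
      · have hbn : b = ((b.toNat : Nat) : Int) := by omega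
        rw [hbn, gsf_prefix b.toNat r hr, hrf]
      · have hr0' : r = 0 := by omega
        have hf0 : f.toNat = 0 := by omega
        simp [hr0', hf0, PySem.List.pyRange_one_eq_nil (le_refl (0:Int))]
    · apply gsf_tail_flatMap
      intro i hi
      have := (PySem.List.mem_pyRange_one).1 hi
      omega

-- ===== VERDICT =====
theorem generate_slow_frames_spec : Claim_equal_generate_slow_frames := by
  intro t s f _
  exact generate_slow_frames_eq t s f
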